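-- pv_equiv track=rewrite | github.com/snowcoder10/Algorithms-PS1 | venv/lib/MrAnagram.py | count_non_anagrams_jumble
-- ===== SOURCE A (Python) =====
-- def count_non_anagrams_jumble(raw_dict):
--
--     dictionary = raw_dict[1:]
--
--     solutions = []
--     rejected = []
--     for word in dictionary:
--         sorted_word = sorted(word.lower())
--         if sorted_word in solutions:
--             solutions.remove(sorted_word)
--             rejected.append(sorted_word)
--         elif sorted_word not in rejected:
--             solutions.append(sorted_word)
--
--     return len(solutions)
-- ===== SOURCE B (Python) =====
-- def count_non_anagrams_jumble(raw_dict):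
--     freq = {}
--     for word in raw_dict[1:]:
--         sig = tuple(sorted(word.lower()))
--         freq[sig] = freq.get(sig, 0) + 1
--     return sum(1 for c in freq.values() if c == 1)
-- ===== Notes on version B (the rewrite author's own statement) =====
-- stated objective: faster
-- what changed: Replaced A's per-word membership tests with remove/append across two running lists by a single-pass signature frequency dictionary followed by counting values equal to 1.
import Mathlib
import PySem

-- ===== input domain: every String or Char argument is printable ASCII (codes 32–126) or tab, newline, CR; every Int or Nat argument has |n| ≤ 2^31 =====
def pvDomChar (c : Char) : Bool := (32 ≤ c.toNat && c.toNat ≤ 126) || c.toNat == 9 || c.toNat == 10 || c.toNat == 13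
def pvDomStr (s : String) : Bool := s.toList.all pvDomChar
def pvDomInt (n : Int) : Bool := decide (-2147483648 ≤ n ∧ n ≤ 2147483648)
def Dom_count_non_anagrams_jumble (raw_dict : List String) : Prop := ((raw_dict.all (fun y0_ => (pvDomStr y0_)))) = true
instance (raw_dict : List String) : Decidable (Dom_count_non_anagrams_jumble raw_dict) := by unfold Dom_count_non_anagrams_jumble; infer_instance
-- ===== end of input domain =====

-- B replaces A's two-list membership/remove/append tracking by a one-pass
-- signature-frequency dictionary followed by counting values equal to 1.

-- ===== PORT A =====
def count_non_anagrams_jumble (raw_dict : List String) : Int :=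
  let dictionary := PySem.List.slice raw_dict (some 1) none
  let st := dictionary.foldl
    (fun (st : List (List Char) × List (List Char)) word =>
      let solutions := st.1
      let rejected := st.2
      let sorted_word := PySem.List.sorted (PySem.Str.lower word).toList (fun c => c) false
      if solutions.contains sorted_word then
        -- remove? is some here (guarded by the membership test), matching Python list.remove
        ((PySem.List.remove? solutions sorted_word).getD solutions, rejected ++ [sorted_word])
      else if rejected.contains sorted_word then
        (solutions, rejected)
      else
        (solutions ++ [sorted_word], rejected))
    ([], [])
  (st.1.length : Int)

-- ===== PORT B =====
def count_non_anagrams_jumble_alt (raw_dict : List String) : Int :=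
  let freq := (PySem.List.slice raw_dict (some 1) none).foldl
    (fun (freq : PySem.Dict (List Char) Int) word =>
      let sig := PySem.List.sorted (PySem.Str.lower word).toList (fun c => c) false
      freq.insert sig (freq.getD sig 0 + 1))
    PySem.Dict.empty
  freq.values.foldl (fun acc c => if c == 1 then acc + 1 else acc) 0

-- ===== PRECONDITION & SPEC =====
def Spec_count_non_anagrams_jumble (raw_dict : List String) (out : Int) : Prop := out = count_non_anagrams_jumble_alt raw_dict
instance (raw_dict : List String) (out : Int) : Decidable (Spec_count_non_anagrams_jumble raw_dict out) := by unfold Spec_count_non_anagrams_jumble; infer_instance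

-- ===== CLAIM (what is proved, stated in full; the proofs are below) =====
def Claim_equal_count_non_anagrams_jumble : Prop := ∀ (raw_dict : List String), Dom_count_non_anagrams_jumble raw_dict → Spec_count_non_anagrams_jumble raw_dict (count_non_anagrams_jumble raw_dict)

-- ===== LEMMAS AND PROOFS =====

-- A's loop body, abstracted over an already-computed signature
def pvStep (st : List (List Char) × List (List Char)) (x : List Char) :
    List (List Char) × List (List Char) :=
  if st.1.contains x then
    ((PySem.List.remove? st.1 x).getD st.1, st.2 ++ [x])
  else if st.2.contains x then
    (st.1, st.2)
  else
    (st.1 ++ [x], st.2)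

-- A's loop over words is the pvStep loop over the precomputed signatures
theorem pvA_foldl (f : String → List Char) (l : List String) :
    l.foldl (fun (st : List (List Char) × List (List Char)) word =>
      if st.1.contains (f word) then
        ((PySem.List.remove? st.1 (f word)).getD st.1, st.2 ++ [f word])
      else if st.2.contains (f word) then
        (st.1, st.2)
      else
        (st.1 ++ [f word], st.2)) ([], [])
    = (l.map f).foldl pvStep ([], []) := by
  rw [List.foldl_map]; rfl

-- B's dictionary loop over words is Counter of the precomputed signatures
theorem pvB_foldl (f : String → List Char) (l : List String) :
    l.foldl (fun (d : PySem.Dict (List Char) Int) word =>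
      d.insert (f word) (d.getD (f word) 0 + 1)) PySem.Dict.empty
    = PySem.Dict.counter (l.map f) := by
  rw [← PySem.Dict.foldl_insert_getD_add_one_eq_counter, List.foldl_map]

-- B's value scan counts the distinct signatures whose multiplicity is 1
theorem pvB_count (xs : List (List Char)) :
    (PySem.Dict.counter xs).values.foldl (fun acc c => if c == 1 then acc + 1 else acc) 0
    = ((((PySem.Set.ofList xs : List (List Char)).filter
          (fun k => (xs.count k : Int) == 1)).length : Int)) := by
  have hvals : (PySem.Dict.counter xs).values
      = (PySem.Set.ofList xs : List (List Char)).map (fun k => (xs.count k : Int)) := by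
    simp only [PySem.Dict.values, PySem.Dict.items_counter, List.map_map]; rfl
  rw [hvals, PySem.List.foldl_count_if, List.countP_map]
  simp only [zero_add, List.countP_eq_length_filter]
  rfl

-- Invariant of A's loop: `solutions` is duplicate-free and holds exactly the signatures
-- seen exactly once so far, `rejected` those seen at least twice.
theorem pvStep_inv (xs : List (List Char)) :
    ∀ (sol rej : List (List Char)) (cnt : List Char → Nat), sol.Nodup → rej.Nodup →
    (∀ s, s ∈ sol ↔ cnt s = 1) → (∀ s, s ∈ rej ↔ 2 ≤ cnt s) →
    (xs.foldl pvStep (sol, rej)).1.Nodup ∧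
      (∀ s, s ∈ (xs.foldl pvStep (sol, rej)).1 ↔ cnt s + xs.count s = 1) := by
  induction xs with
  | nil =>
    intro sol rej cnt hs _ hsol _
    simpa using ⟨hs, fun s => hsol s⟩
  | cons x xs ih =>
    intro sol rej cnt hs hr hsol hrej
    have hcnt : ∀ s, (cnt s + if s = x then 1 else 0) + xs.count s
        = cnt s + (x :: xs).count s := by
      intro s
      simp only [List.count_cons, beq_iff_eq]
      by_cases h : s = x
      · subst h; simp; omega
      · rw [if_neg h, if_neg (mt Eq.symm h)]; omega
    by_cases hx : x ∈ sol
    · have hx1 : cnt x = 1 := (hsol x).1 hx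
      have hxr : x ∉ rej := fun h => by have := (hrej x).1 h; omega
      have hrm : PySem.List.remove? sol x = some (sol.erase x) :=
        PySem.List.remove?_eq_some_erase sol x hx
      have hstep : pvStep (sol, rej) x = (sol.erase x, rej ++ [x]) := by
        simp [pvStep, hx, hrm]
      obtain ⟨h1, h2⟩ := ih (sol.erase x) (rej ++ [x]) (fun s => cnt s + if s = x then 1 else 0)
        (hs.erase x)
        (by simp [List.nodup_append, hr]; exact fun a ha h => hxr (h ▸ ha))
        (by
          intro s
          rw [hs.mem_erase_iff]
          by_cases h : s = x
          · subst h; simp [hx1]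
          · simp [h, hsol s])
        (by
          intro s
          by_cases h : s = x
          · subst h; simp [hx1]
          · simp [h, hrej s])
      rw [List.foldl_cons, hstep]
      exact ⟨h1, fun s => (h2 s).trans (by rw [hcnt s])⟩
    · by_cases hx2 : x ∈ rej
      · have hx1 : 2 ≤ cnt x := (hrej x).1 hx2
        have hstep : pvStep (sol, rej) x = (sol, rej) := by
          simp [pvStep, hx, hx2]
        obtain ⟨h1, h2⟩ := ih sol rej (fun s => cnt s + if s = x then 1 else 0)
          hs hr
          (by
            intro s
            by_cases h : s = x
            · subst h; simp [hx]; omega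
            · simp [h, hsol s])
          (by
            intro s
            by_cases h : s = x
            · subst h; simp [hx2]; omega
            · simp [h, hrej s])
        rw [List.foldl_cons, hstep]
        exact ⟨h1, fun s => (h2 s).trans (by rw [hcnt s])⟩
      · have hx0 : cnt x = 0 := by
          have h1 := (hsol x).2; have h2 := (hrej x).2
          by_contra h
          rcases Nat.lt_or_ge (cnt x) 2 with hlt | hge
          · exact hx (h1 (by omega))
          · exact hx2 (h2 hge)
        have hstep : pvStep (sol, rej) x = (sol ++ [x], rej) := by
          simp [pvStep, hx, hx2]
        obtain ⟨h1, h2⟩ := ih (sol ++ [x]) rej (fun s => cnt s + if s = x then 1 else 0)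
          (by simp [List.nodup_append, hs]; exact fun a ha h => hx (h ▸ ha))
          hr
          (by
            intro s
            by_cases h : s = x
            · subst h; simp [hx0]
            · simp [h, hsol s])
          (by
            intro s
            by_cases h : s = x
            · subst h; simp [hx2, hx0]
            · simp [h, hrej s])
        rw [List.foldl_cons, hstep]
        exact ⟨h1, fun s => (h2 s).trans (by rw [hcnt s])⟩

-- ===== VERDICT (by name: the statement is the Claim_ definition above) =====
theorem count_non_anagrams_jumble_spec : Claim_equal_count_non_anagrams_jumble := by
  intro raw_dict _
  show count_non_anagrams_jumble raw_dict = count_non_anagrams_jumble_alt raw_dict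
  simp only [count_non_anagrams_jumble, count_non_anagrams_jumble_alt]
  rw [pvA_foldl (fun w => PySem.List.sorted (PySem.Str.lower w).toList (fun c => c) false),
      pvB_foldl (fun w => PySem.List.sorted (PySem.Str.lower w).toList (fun c => c) false),
      pvB_count]
  generalize ((PySem.List.slice raw_dict (some 1) none).map
      (fun w => PySem.List.sorted (PySem.Str.lower w).toList (fun c => c) false)) = xs
  obtain ⟨hnd, hmem⟩ := pvStep_inv xs [] [] (fun _ => 0)
    List.nodup_nil List.nodup_nil (by simp) (by simp)
  have hperm : (xs.foldl pvStep ([], [])).1.Perm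
      ((PySem.Set.ofList xs : List (List Char)).filter (fun k => (xs.count k : Int) == 1)) := by
    refine (List.perm_ext_iff_of_nodup hnd ((PySem.Set.nodup_ofList xs).filter _)).2 ?_
    intro a
    rw [hmem a, List.mem_filter, PySem.Set.mem_ofList]
    constructor
    · intro h
      have hc : xs.count a = 1 := by simpa using h
      exact ⟨List.count_pos_iff.1 (by omega), by simp [hc]⟩
    · rintro ⟨_, h⟩
      have hc : xs.count a = 1 := by simpa using h
      simpa using hc
  rw [hperm.length_eq]
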